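-- pv_equiv track=rewrite | github.com/Mazen2378/.config | aymen/serie3/ex2.py | max_long_couleur
-- ===== SOURCE A (Python) =====
-- def dict_long_couleur(d):
--     dict = {}
--     for key in d.values():
--         dict[key] = len(key)
--     return dict
--
-- def max_long_couleur(d):
--     res = []
--     maximum = 0
--     dict = dict_long_couleur(d)
--     for key,value in dict.items():
--         if value == maximum :
--             res.append(key)
--         elif value > maximum:
--             maximum = value
--             res = [key]
--     return res
-- ===== SOURCE B (Python) =====
-- def max_long_couleur(d):
--     unique = list(dict.fromkeys(d.values()))
--     m = max((len(v) for v in unique), default=0)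
--     return [v for v in unique if len(v) == m]
-- ===== Notes on version B (the rewrite author's own statement) =====
-- stated objective: simpler
-- what changed: Replaces A's helper dict of value lengths and its reset-as-you-go running-max loop by a dedup-then-max-then-filter decomposition: dedup the values with dict.fromkeys, compute the maximum length up front, and filter once.
import Mathlib
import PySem

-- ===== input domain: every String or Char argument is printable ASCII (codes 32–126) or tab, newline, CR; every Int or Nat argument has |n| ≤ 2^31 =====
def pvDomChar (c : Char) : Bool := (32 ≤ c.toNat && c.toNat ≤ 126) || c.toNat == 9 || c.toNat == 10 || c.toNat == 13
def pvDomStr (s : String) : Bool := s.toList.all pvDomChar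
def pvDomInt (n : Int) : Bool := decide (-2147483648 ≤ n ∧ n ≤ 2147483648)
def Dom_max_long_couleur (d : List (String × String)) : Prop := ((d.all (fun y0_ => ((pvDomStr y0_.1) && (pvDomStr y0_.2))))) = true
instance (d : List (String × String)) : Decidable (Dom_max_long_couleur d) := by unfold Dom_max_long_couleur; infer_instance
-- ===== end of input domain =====

-- B replaces A's length-dict and reset-as-you-go running-max loop by dedup, then max up front, then one filter (simpler decomposition, same cost).

-- ===== PORT A =====
-- helper dict_long_couleur: dict = {}; for key in d.values(): dict[key] = len(key)
def dict_long_couleur (d : List (String × String)) : PySem.Dict String Int :=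
  ((PySem.Dict.ofList d).values).foldl
    (fun dict key => dict.insert key (PySem.Str.len key)) PySem.Dict.empty

-- res = []; maximum = 0; for key,value in dict.items(): …
def max_long_couleur (d : List (String × String)) : List String :=
  (((dict_long_couleur d).items).foldl
    (fun (st : List String × Int) kv =>
      if kv.2 = st.2 then (st.1 ++ [kv.1], st.2)
      else if kv.2 > st.2 then ([kv.1], kv.2)
      else st)
    ([], (0 : Int))).1

-- ===== PORT B =====
def max_long_couleur_alt (d : List (String × String)) : List String :=
  let unique := PySem.List.dedup ((PySem.Dict.ofList d).values)
  let m := PySem.List.maxD (unique.map PySem.Str.len) (fun x => x) 0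
  unique.filter (fun v => PySem.Str.len v == m)

-- ===== PRECONDITION & SPEC =====
def Spec_max_long_couleur (d : List (String × String)) (out : List String) : Prop := out = max_long_couleur_alt d
instance (d : List (String × String)) (out : List String) : Decidable (Spec_max_long_couleur d out) := by unfold Spec_max_long_couleur; infer_instance

-- ===== CLAIM (what is proved, stated in full; the proofs are below) =====
def Claim_equal_max_long_couleur : Prop := ∀ (d : List (String × String)), Dom_max_long_couleur d → Spec_max_long_couleur d (max_long_couleur d)

-- ===== LEMMAS AND PROOFS =====

-- value stored by A's dict-building loop at any key it contains is that key's length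
theorem getD_dict_build (l : List String) (d : PySem.Dict String Int) (k : String) :
    (l.foldl (fun dict key => dict.insert key (PySem.Str.len key)) d).getD k 0 =
      if k ∈ l then PySem.Str.len k else d.getD k 0 := by
  induction l generalizing d with
  | nil => simp
  | cons x t ih =>
    simp only [List.foldl_cons, ih, List.mem_cons]
    by_cases hkt : k ∈ t
    · simp [hkt]
    · by_cases hkx : k = x
      · simp [hkx]
      · simp [hkx, hkt, PySem.Dict.getD_insert]

-- A's dict lists exactly the deduplicated values, each paired with its length
theorem items_dict_long_couleur (d : List (String × String)) :
    (dict_long_couleur d).items =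
      (PySem.List.dedup ((PySem.Dict.ofList d).values)).map
        (fun k => (k, PySem.Str.len k)) := by
  unfold dict_long_couleur
  set vs := (PySem.Dict.ofList d).values with hvs
  have hnd : ((vs.foldl (fun dict key => dict.insert key (PySem.Str.len key))
      PySem.Dict.empty)).keys.Nodup :=
    PySem.Dict.nodup_keys_foldl_insert vs _ _ (by simp)
  have hkeys : ((vs.foldl (fun dict key => dict.insert key (PySem.Str.len key))
      PySem.Dict.empty)).keys = PySem.List.dedup vs := by
    rw [PySem.Dict.keys_foldl_insert vs (fun _ key => PySem.Str.len key) PySem.Dict.empty]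
    simp [pysem]
  rw [PySem.Dict.items_eq_map_keys _ hnd 0, hkeys]
  refine List.map_congr_left (fun k hk => ?_)
  have hkvs : k ∈ vs := (PySem.List.mem_dedup (xs := vs) (x := k)).mp hk
  rw [getD_dict_build]
  simp [hkvs]

-- A's scan, characterised (stated for an arbitrary integer weight L): the running max
-- becomes the true max, and res becomes (prefix kept iff the max never rose) ++ the
-- elements of maximal weight
theorem loopA {α : Type} (L : α → Int) (l : List α) (res : List α) (m : Int) :
    l.foldl
      (fun (st : List α × Int) k =>
        if L k = st.2 then (st.1 ++ [k], st.2)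
        else if L k > st.2 then ([k], L k)
        else st)
      (res, m) =
    (if m = l.foldl (fun a k => max a (L k)) m
      then res ++ l.filter (fun k => L k == m)
      else l.filter (fun k => L k == l.foldl (fun a k => max a (L k)) m),
     l.foldl (fun a k => max a (L k)) m) := by
  induction l generalizing res m with
  | nil => simp
  | cons k t ih =>
    have hmono : ∀ m' : Int, m' ≤ t.foldl (fun a k => max a (L k)) m' :=
      fun m' => (PySem.List.le_foldl_max_int t L m').1
    by_cases h1 : L k = m
    · -- value == maximum: append
      have hg : (k :: t).foldl (fun a k => max a (L k)) m
          = t.foldl (fun a k => max a (L k)) m := by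
        simp only [List.foldl_cons]; congr 1; omega
      simp only [List.foldl_cons, if_pos h1, ih, hg, List.filter_cons]
      by_cases h2 : m = t.foldl (fun a k => max a (L k)) m
      · simp [← h2, h1]
      · have hne : ¬ L k = t.foldl (fun a k => max a (L k)) m := by rw [h1]; exact h2
        simp [h2, hne]
    · by_cases h3 : L k > m
      · -- new maximum: reset
        have hg : (k :: t).foldl (fun a k => max a (L k)) m
            = t.foldl (fun a k => max a (L k)) (L k) := by
          simp only [List.foldl_cons]; congr 1; omega
        simp only [List.foldl_cons, if_neg h1, if_pos h3, ih, hg, List.filter_cons]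
        have hmne : ¬ m = t.foldl (fun a k => max a (L k)) (L k) := by
          have := hmono (L k); omega
        by_cases h4 : L k = t.foldl (fun a k => max a (L k)) (L k)
        · simp [← h4, show ¬ m = L k from fun hh => h1 hh.symm]
        · simp [h4, hmne]
      · -- value < maximum: skip
        have hg : (k :: t).foldl (fun a k => max a (L k)) m
            = t.foldl (fun a k => max a (L k)) m := by
          simp only [List.foldl_cons]; congr 1; omega
        simp only [List.foldl_cons, if_neg h1, if_neg h3, ih, hg, List.filter_cons]
        by_cases h2 : m = t.foldl (fun a k => max a (L k)) m
        · simp [← h2, h1]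
        · have hne : ¬ L k = t.foldl (fun a k => max a (L k)) m := by
            have := hmono m; omega
          simp [h2, hne]

-- B's max(…, default=0) is the running max from 0
theorem maxD_len (l : List String) :
    PySem.List.maxD (l.map PySem.Str.len) (fun x => x) 0 =
      l.foldl (fun a k => max a (PySem.Str.len k)) 0 := by
  cases l with
  | nil => simp [PySem.List.maxD, PySem.List.max?]
  | cons k t =>
    have h0 : (0 : Int) ≤ PySem.Str.len k := by simp [pysem]
    simp only [List.map_cons, PySem.List.maxD, PySem.List.max?_id_cons, Option.getD_some,
      List.foldl_cons, List.foldl_map]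
    rw [max_eq_right h0]

-- port A as the loopA-shaped fold over the deduplicated values
theorem portA_eq (d : List (String × String)) :
    max_long_couleur d =
      ((PySem.List.dedup ((PySem.Dict.ofList d).values)).foldl
        (fun (st : List String × Int) k =>
          if PySem.Str.len k = st.2 then (st.1 ++ [k], st.2)
          else if PySem.Str.len k > st.2 then ([k], PySem.Str.len k)
          else st)
        ([], (0 : Int))).1 := by
  unfold max_long_couleur
  rw [items_dict_long_couleur, List.foldl_map]

-- port B with the max written as the running max
theorem portB_eq (d : List (String × String)) :
    max_long_couleur_alt d =
      (PySem.List.dedup ((PySem.Dict.ofList d).values)).filter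
        (fun v => PySem.Str.len v ==
          (PySem.List.dedup ((PySem.Dict.ofList d).values)).foldl
            (fun a k => max a (PySem.Str.len k)) 0) := by
  simp only [max_long_couleur_alt, maxD_len]

-- ===== VERDICT (by name: the statement is the Claim_ definition above) =====
theorem max_long_couleur_spec : Claim_equal_max_long_couleur := by
  intro d _
  show max_long_couleur d = max_long_couleur_alt d
  rw [portA_eq, portB_eq, loopA]
  by_cases h : (0 : Int) =
      (PySem.List.dedup ((PySem.Dict.ofList d).values)).foldl
        (fun a k => max a (PySem.Str.len k)) 0
  · rw [if_pos h, ← h]; simp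
  · rw [if_neg h]
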